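-- pv_equiv track=rewrite | github.com/squishyjs/daily-solve | Python/bigAchiever.py | solve
-- ===== SOURCE A (Python) =====
-- def solve(number: int, students: list[int]) -> list[int]:
--     students_emotion: list[int] = []
--
--     max_happy: int = 0
--     for student in students:
--         if student > max_happy:
--             students_emotion.append(1)
--             max_happy = student
--         else:
--             students_emotion.append(0)
--
--     return students_emotion
-- ===== SOURCE B (Python) =====
-- def solve(number: int, students: list[int]) -> list[int]:
--     # a student is a record iff strictly positive and strictly above every earlier student
--     return [1 if s > 0 and all(s > t for t in students[:i]) else 0
--             for i, s in enumerate(students)]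
-- ===== Notes on version B (the rewrite author's own statement) =====
-- stated objective: simpler
-- what changed: Drops the running-max state entirely: each student is judged independently by the record definition itself (strictly positive and strictly above every earlier student), a stateless per-element comprehension instead of A's stateful accumulator loop.
import Mathlib
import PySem

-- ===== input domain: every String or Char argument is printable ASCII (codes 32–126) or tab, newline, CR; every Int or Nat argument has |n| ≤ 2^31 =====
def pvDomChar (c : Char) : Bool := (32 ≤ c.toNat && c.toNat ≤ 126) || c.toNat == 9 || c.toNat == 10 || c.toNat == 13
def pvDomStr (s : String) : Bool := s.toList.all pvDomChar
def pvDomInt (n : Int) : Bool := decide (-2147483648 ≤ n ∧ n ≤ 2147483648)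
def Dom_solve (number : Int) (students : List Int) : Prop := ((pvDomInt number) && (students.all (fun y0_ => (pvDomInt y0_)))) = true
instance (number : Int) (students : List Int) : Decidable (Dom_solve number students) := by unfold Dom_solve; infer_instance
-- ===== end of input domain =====

-- B drops A's running-max accumulator: each student is judged independently by the record
-- definition itself (strictly positive and strictly above every earlier student) — stateless
-- per-element comprehension (alternative decomposition, O(n^2) vs A's O(n)).


-- ===== PORT A =====
def solve (number : Int) (students : List Int) : List Int :=
  (students.foldl (fun (st : List Int × Int) student =>
      if student > st.2 then (st.1 ++ [1], student) else (st.1 ++ [0], st.2))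
    ([], 0)).1

-- ===== PORT B =====
-- B: per-element comprehension over enumerate(students); students[:i] is PySem.List.slice
def solve_alt (number : Int) (students : List Int) : List Int :=
  (PySem.List.enumerate students).map (fun p =>
    if decide (p.2 > 0) &&
       (PySem.List.slice students none (some p.1)).all (fun t => decide (p.2 > t))
    then (1 : Int) else 0)

-- ===== PRECONDITION & SPEC =====
def Spec_solve (number : Int) (students : List Int) (out : List Int) : Prop := out = solve_alt number students
instance (number : Int) (students : List Int) (out : List Int) : Decidable (Spec_solve number students out) := by unfold Spec_solve; infer_instance

-- ===== CLAIM (what is proved, stated in full; the proofs are below) =====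
def Claim_equal_solve : Prop := ∀ (number : Int) (students : List Int), Dom_solve number students → Spec_solve number students (solve number students)

-- ===== LEMMAS AND PROOFS =====

def fA : List Int × Int → Int → List Int × Int := fun st student =>
  if student > st.2 then (st.1 ++ [1], student) else (st.1 ++ [0], st.2)

def specRec : Int → List Int → List Int
  | _, [] => []
  | m, s :: t => (if s > m then 1 else 0) :: specRec (max m s) t

theorem foldA_prefix (t : List Int) (acc : List Int) (m : Int) :
    (t.foldl fA (acc, m)).1 = acc ++ (t.foldl fA ([], m)).1 := by
  induction t generalizing acc m with
  | nil => simp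
  | cons s t ih =>
    simp only [List.foldl_cons, fA]
    split <;> simp only [List.nil_append] <;> rw [ih, ih ([_])] <;> simp

theorem foldA_eq_specRec (t : List Int) (m : Int) :
    (t.foldl fA ([], m)).1 = specRec m t := by
  induction t generalizing m with
  | nil => simp [specRec]
  | cons s t ih =>
    simp only [List.foldl_cons, fA, specRec, List.nil_append]
    split
    · next h =>
      rw [foldA_prefix]
      have : max m s = s := by omega
      rw [this, ih]; simp
    · next h =>
      rw [foldA_prefix]
      have : max m s = m := by omega
      rw [this, ih]; simp

theorem specRec_length (t : List Int) (m : Int) : (specRec m t).length = t.length := by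
  induction t generalizing m with
  | nil => rfl
  | cons s t ih => simp [specRec, ih]

theorem specRec_getElem (t : List Int) (m : Int) (i : Nat) (h : i < t.length)
    (h' : i < (specRec m t).length) :
    (specRec m t)[i] = if t[i] > (t.take i).foldl max m then 1 else 0 := by
  induction t generalizing m i with
  | nil => simp at h
  | cons s t ih =>
    cases i with
    | zero => simp [specRec]
    | succ i =>
      have h2 : i < t.length := by simpa using h
      simp only [specRec, List.getElem_cons_succ, List.take_succ_cons, List.foldl_cons]
      exact ih _ _ h2 (by simpa [specRec_length] using h2)

theorem gt_foldl_max (l : List Int) (x a : Int) :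
    x > l.foldl max a ↔ x > a ∧ ∀ y ∈ l, x > y := by
  induction l generalizing a with
  | nil => simp
  | cons b l ih =>
    simp only [List.foldl_cons, ih, List.mem_cons]
    constructor
    · rintro ⟨h1, h2⟩
      refine ⟨by omega, ?_⟩
      rintro y (rfl | hy)
      · omega
      · exact h2 y hy
    · rintro ⟨h1, h2⟩
      refine ⟨by have := h2 b (Or.inl rfl); omega, fun y hy => h2 y (Or.inr hy)⟩

theorem solve_alt_getElem (number : Int) (students : List Int) (i : Nat)
    (h : i < students.length) (h' : i < (solve_alt number students).length) :
    (solve_alt number students)[i] =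
      if students[i] > (students.take i).foldl max 0 then 1 else 0 := by
  unfold solve_alt
  rw [List.getElem_map, PySem.List.getElem_enumerate]
  have hz : (0 : Int) + (i : Int) = ((i : Nat) : Int) := by omega
  rw [hz, PySem.List.slice_to_natCast]
  by_cases hc : students[i] > (students.take i).foldl max 0
  · obtain ⟨h1, h2⟩ := (gt_foldl_max (students.take i) students[i] 0).mp hc
    rw [if_pos hc]
    have hb : (decide (students[i] > 0) &&
        (students.take i).all fun t => decide (students[i] > t)) = true := by
      simp only [Bool.and_eq_true, decide_eq_true_eq, List.all_eq_true]
      exact ⟨h1, fun y hy => by simpa using h2 y hy⟩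
    exact if_pos hb
  · rw [if_neg hc]
    have hb : ¬ ((decide (students[i] > 0) &&
        (students.take i).all fun t => decide (students[i] > t)) = true) := by
      simp only [Bool.and_eq_true, decide_eq_true_eq, List.all_eq_true]
      intro ⟨h1, h2⟩
      exact hc ((gt_foldl_max (students.take i) students[i] 0).mpr
        ⟨h1, fun y hy => by simpa using h2 y hy⟩)
    exact if_neg hb

theorem solve_alt_length (number : Int) (students : List Int) :
    (solve_alt number students).length = students.length := by
  simp [solve_alt, PySem.List.length_enumerate]

-- ===== VERDICT (by name: the statement is the Claim_ definition above) =====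
theorem solve_spec : Claim_equal_solve := by
  intro number students _
  unfold Spec_solve solve
  show (students.foldl fA ([], 0)).1 = _
  rw [foldA_eq_specRec]
  apply List.ext_getElem
  · rw [specRec_length, solve_alt_length]
  · intro i h1 h2
    rw [specRec_getElem students 0 i (by simpa [specRec_length] using h1) h1,
        solve_alt_getElem number students i (by simpa [solve_alt_length] using h2) h2]
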